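-- pv_equiv track=rewrite | github.com/openshift-assisted/assisted-service-mcp | assisted_service_mcp/src/utils/log_analyzer/log_analyzer.py | partition_cluster_events
-- ===== SOURCE A (Python) =====
-- from typing import Dict, List, Any, cast
--
-- def partition_cluster_events(
--     events: List[Dict[str, Any]],
-- ) -> List[List[Dict[str, Any]]]:
--     """Partition events by reset events to separate installation attempts."""
--     partitions = []
--     current_partition = []
--
--     for event in events:
--         if event["name"] == "cluster_installation_reset":
--             if current_partition:
--                 partitions.append(current_partition)
--                 current_partition = []
--         else:
--             current_partition.append(event)
--
--     if current_partition:
--         partitions.append(current_partition)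
--
--     return partitions or [[]]
-- ===== SOURCE B (Python) =====
-- def partition_cluster_events(events):
--     """Partition events by reset events to separate installation attempts."""
--     partitions = []
--     i = 0
--     n = len(events)
--     while i < n:
--         if events[i]["name"] == "cluster_installation_reset":
--             i += 1
--             continue
--         j = i
--         while j < n and events[j]["name"] != "cluster_installation_reset":
--             j += 1
--         partitions.append(events[i:j])
--         i = j
--     return partitions or [[]]
-- ===== Notes on version B (the rewrite author's own statement) =====
-- stated objective: alternative
-- what changed: Replaces the element-by-element accumulator-and-flush loop with a two-pointer run scanner that finds each maximal run of non-reset events and appends it as a slice in one step.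
import Mathlib
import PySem

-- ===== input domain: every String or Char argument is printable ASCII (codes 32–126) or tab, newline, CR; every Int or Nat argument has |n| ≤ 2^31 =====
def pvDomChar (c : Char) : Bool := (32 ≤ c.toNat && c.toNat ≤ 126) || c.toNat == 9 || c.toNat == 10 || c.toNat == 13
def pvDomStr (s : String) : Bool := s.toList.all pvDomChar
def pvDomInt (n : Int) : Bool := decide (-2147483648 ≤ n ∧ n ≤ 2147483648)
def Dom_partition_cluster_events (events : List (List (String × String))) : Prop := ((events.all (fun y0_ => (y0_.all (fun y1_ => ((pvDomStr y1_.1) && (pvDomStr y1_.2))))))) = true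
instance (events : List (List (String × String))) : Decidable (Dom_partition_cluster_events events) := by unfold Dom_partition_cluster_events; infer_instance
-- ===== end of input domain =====

-- B replaces A's accumulator-and-flush loop with a run scanner that emits each maximal
-- non-reset run at once (objective: alternative decomposition, same return value).

-- B replaces A's accumulator-and-flush loop with a run scanner that emits each maximal
-- non-reset run at once (objective: alternative decomposition, same return value).

-- ===== PORT A =====
-- event["name"] is the first-match lookup on the association list (List.lookup), exact for a Python dict.
def pvStepA (st : List (List (List (String × String))) × List (List (String × String)))
    (event : List (String × String)) :
    List (List (List (String × String))) × List (List (String × String)) :=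
  if List.lookup "name" event == some "cluster_installation_reset" then
    if st.2 ≠ [] then (st.1 ++ [st.2], []) else st
  else (st.1, st.2 ++ [event])

-- A: fold over events maintaining (partitions, current_partition), flushing on reset markers.
def partition_cluster_events (events : List (List (String × String))) : List (List (List (String × String))) :=
  let st := events.foldl pvStepA ([], [])
  let partitions := if st.2 ≠ [] then st.1 ++ [st.2] else st.1
  if partitions ≠ [] then partitions else [[]]

-- ===== PORT B =====
def pvIsReset (e : List (String × String)) : Bool :=
  List.lookup "name" e == some "cluster_installation_reset"

-- B's run scanner: skip reset markers, otherwise emit the maximal run starting here.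
def pvRuns : List (List (String × String)) → List (List (List (String × String)))
  | [] => []
  | e :: rest =>
    if pvIsReset e then pvRuns rest
    else (e :: rest.takeWhile (fun x => !pvIsReset x)) :: pvRuns (rest.dropWhile (fun x => !pvIsReset x))
termination_by l => l.length
decreasing_by
  · simp
  · exact Nat.lt_succ_of_le (List.length_dropWhile_le _ _)

def partition_cluster_events_alt (events : List (List (String × String))) : List (List (List (String × String))) :=
  let partitions := pvRuns events
  if partitions ≠ [] then partitions else [[]]

-- ===== PRECONDITION & SPEC =====
-- Pre_ excludes exactly the inputs where some event lacks a "name" key: Python A raises KeyError there (and so does B).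
def Pre_partition_cluster_events (events : List (List (String × String))) : Prop :=
  (events.all (fun e => (List.lookup "name" e).isSome)) = true
instance (events : List (List (String × String))) : Decidable (Pre_partition_cluster_events events) := by
  unfold Pre_partition_cluster_events; infer_instance
def pvWitness_partition_cluster_events : (List (List (String × String))) :=
  [[("name", "host_registered")], [("name", "cluster_installation_reset")], [("name", "done")]]

def Spec_partition_cluster_events (events : List (List (String × String))) (out : List (List (List (String × String)))) : Prop := out = partition_cluster_events_alt events
instance (events : List (List (String × String))) (out : List (List (List (String × String)))) : Decidable (Spec_partition_cluster_events events out) := by unfold Spec_partition_cluster_events; infer_instance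

-- ===== CLAIM (what is proved, stated in full; the proofs are below) =====
def Claim_equal_partition_cluster_events : Prop := ∀ (events : List (List (String × String))), Dom_partition_cluster_events events → Pre_partition_cluster_events events → Spec_partition_cluster_events events (partition_cluster_events events)

-- ===== LEMMAS AND PROOFS =====

-- F: A's fold with the final flush distributed over the remaining input.
def pvF (cur : List (List (String × String))) : List (List (String × String)) → List (List (List (String × String)))
  | [] => if cur ≠ [] then [cur] else []
  | e :: rest =>
    if pvIsReset e then
      (if cur ≠ [] then cur :: pvF [] rest else pvF [] rest)
    else pvF (cur ++ [e]) rest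

lemma pvF_foldl (evs : List (List (String × String))) :
    ∀ acc cur,
      (if (evs.foldl pvStepA (acc, cur)).2 ≠ [] then
         (evs.foldl pvStepA (acc, cur)).1 ++ [(evs.foldl pvStepA (acc, cur)).2]
       else (evs.foldl pvStepA (acc, cur)).1) = acc ++ pvF cur evs := by
  induction evs with
  | nil =>
    intro acc cur
    simp only [List.foldl_nil, pvF]
    split_ifs <;> simp
  | cons e rest ih =>
    intro acc cur
    simp only [List.foldl_cons, pvF, pvStepA, pvIsReset]
    by_cases h : (List.lookup "name" e == some "cluster_installation_reset") = true
    · simp only [h, if_true]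
      by_cases hc : cur ≠ []
      · simp only [if_pos hc]
        rw [ih (acc ++ [cur]) []]
        simp
      · simp only [if_neg hc]
        simp only [ne_eq, not_not] at hc
        simp only [hc, ne_eq, not_true_eq_false, reduceIte]
        exact ih acc []
    · simp only [h]
      exact ih acc (cur ++ [e])

-- Combined: pvF [] = pvRuns, and pvF cur prepends cur to the leading run.
lemma pvF_runs (evs : List (List (String × String))) :
    pvF [] evs = pvRuns evs ∧
    ∀ cur, cur ≠ [] →
      pvF cur evs = (cur ++ evs.takeWhile (fun x => !pvIsReset x)) :: pvRuns (evs.dropWhile (fun x => !pvIsReset x)) := by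
  induction evs with
  | nil =>
    refine ⟨by simp [pvF, pvRuns], ?_⟩
    intro cur hc; simp [pvF, pvRuns, hc]
  | cons e rest ih =>
    by_cases h : pvIsReset e
    · refine ⟨?_, ?_⟩
      · simp only [pvF, pvRuns, if_pos h, ne_eq, not_true_eq_false, if_false]
        exact ih.1
      · intro cur hc
        simp only [pvF, if_pos hc, List.takeWhile_cons,
          List.dropWhile_cons, h]
        simp only [Bool.not_true, Bool.false_eq_true, if_false]
        rw [ih.1]
        simp [pvRuns, h]
    · refine ⟨?_, ?_⟩
      · simp only [pvF, if_neg h]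
        rw [show ([] : List (List (String × String))) ++ [e] = [e] from rfl,
          ih.2 [e] (by simp)]
        rw [pvRuns]
        simp [h]
      · intro cur hc
        simp only [pvF, if_neg h]
        rw [ih.2 (cur ++ [e]) (by simp)]
        simp only [List.takeWhile_cons, List.dropWhile_cons, h]
        simp

-- ===== VERDICT (by name: the statement is the Claim_ definition above) =====
theorem partition_cluster_events_spec : Claim_equal_partition_cluster_events := by
  intro events _ _
  unfold Spec_partition_cluster_events partition_cluster_events partition_cluster_events_alt
  simp only []
  rw [pvF_foldl events [] []]
  rw [(pvF_runs events).1]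
  simp
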